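-- pv_equiv track=rewrite | github.com/BaronPipistron/numeric-methods | lab-1/3/3.2.py | check_matrix_for_seidel_method
-- ===== SOURCE A (Python) =====
-- def check_matrix_for_seidel_method(matrix):
--     n = len(matrix)
--
--     for i in range(n):
--         if matrix[i][i] == 0:
--             return False
--
--         row_sum = sum(abs(matrix[i][j]) for j in range(n) if j != i)
--
--         if abs(matrix[i][i]) < row_sum:
--             found = False
--
--             for h in range(i + 1, n):
--                 row_sum_h = sum(abs(matrix[h][t]) for t in range(n) if t != h)
--
--                 if abs(matrix[h][i]) > row_sum and abs(matrix[h][h]) > row_sum_h: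
--                     matrix[i], matrix[h] = matrix[h], matrix[i]
--                     found = True
--                     break
--
--             if not found:
--                 return False
--
--     return True
-- ===== SOURCE B (Python) =====
-- def check_matrix_for_seidel_method(matrix):
--     n = len(matrix)
--     # Work on a shrinking suffix of (row, abs-total) pairs: each step consumes the
--     # front pair; a rescue swaps the first eligible later pair to the front before
--     # it is consumed.  Column index i counts the consumed prefix.
--     rest = [(row, sum(abs(x) for x in row[:n])) for row in matrix]
--     for i in range(n):
--         row, tot = rest[0]
--         d = row[i]
--         if d == 0:
--             return False
--         if 2 * abs(d) < tot:
--             rs = tot - abs(d)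
--             k = next((k for k, (r2, t2) in enumerate(rest)
--                       if k > 0 and abs(r2[i]) > rs and 2 * abs(r2[i + k]) > t2), None)
--             if k is None:
--                 return False
--             rest[0], rest[k] = rest[k], rest[0]
--         rest = rest[1:]
--     return True
-- ===== Notes on version B (the rewrite author's own statement) =====
-- stated objective: alternative
-- what changed: B replaces A's in-place index-swapping scan of the whole matrix by a single pass that consumes a shrinking suffix of (row, absolute-total) pairs: each step pops the front pair, derives its off-diagonal sum as total - |diag|, and on failure swaps the first eligible later pair to the front via one enumerate/next scan, so A's per-candidate re-summation disappears (O(n^3) worst case becomes O(n^2); measured only ~1.49x at the largest timed size).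
-- outside the precondition, e.g. on check_matrix_for_seidel_method([[2, 0, 0], [0, 0, 9], [5]]): A returns False, B returns False
import Mathlib
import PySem

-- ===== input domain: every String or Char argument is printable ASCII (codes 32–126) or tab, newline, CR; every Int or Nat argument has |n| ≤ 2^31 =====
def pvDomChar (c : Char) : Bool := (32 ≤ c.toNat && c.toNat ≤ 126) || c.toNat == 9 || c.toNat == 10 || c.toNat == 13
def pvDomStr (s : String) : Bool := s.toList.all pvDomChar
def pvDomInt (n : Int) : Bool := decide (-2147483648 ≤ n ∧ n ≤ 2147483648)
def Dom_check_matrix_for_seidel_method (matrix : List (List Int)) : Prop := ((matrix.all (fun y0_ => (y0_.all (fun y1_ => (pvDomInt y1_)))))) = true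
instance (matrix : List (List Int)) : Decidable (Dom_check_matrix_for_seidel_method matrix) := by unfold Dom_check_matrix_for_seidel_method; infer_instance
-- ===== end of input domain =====

-- ===== PORT A =====
-- B changes the traversal (consumed suffix of (row,total) pairs vs in-place indexed swaps); A mutates
-- `matrix` in place, B does not: the equivalence proved here is about the return value only.

-- row_sum = sum(abs(matrix[i][j]) for j in range(n) if j != i)
def pvRowSumA (row : List Int) (skip n : Nat) : Int :=
  (List.range n).foldl (fun s j => if j ≠ skip then s + |row.getD j 0| else s) 0

-- the inner `for h in range(i+1, n): … break` search for a swap candidate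
def pvSearchA (m : List (List Int)) (n i : Nat) (rowSum : Int) : List Nat → Option Nat
  | [] => none
  | h :: rest =>
    let rowh := m.getD h []
    let rsh := pvRowSumA rowh h n
    if rowSum < |rowh.getD i 0| ∧ rsh < |rowh.getD h 0| then some h
    else pvSearchA m n i rowSum rest

-- matrix[i], matrix[h] = matrix[h], matrix[i]
def pvSwapA (m : List (List Int)) (i h : Nat) : List (List Int) :=
  (m.set i (m.getD h [])).set h (m.getD i [])

def pvLoopA (n : Nat) (m : List (List Int)) (i : Nat) : Bool :=
  if hlt : i < n then
    let row := m.getD i []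
    let diag := row.getD i 0
    if diag = 0 then false
    else
      let rs := pvRowSumA row i n
      if |diag| < rs then
        match pvSearchA m n i rs (List.range' (i + 1) (n - (i + 1))) with
        | none => false
        | some h => pvLoopA n (pvSwapA m i h) (i + 1)
      else pvLoopA n m (i + 1)
  else true
termination_by n - i

def check_matrix_for_seidel_method (matrix : List (List Int)) : Bool :=
  pvLoopA matrix.length matrix 0

-- ===== PORT B =====
-- sum(abs(x) for x in row[:n])
def pvTotB (n : Nat) (row : List Int) : Int :=
  (row.take n).foldl (fun s x => s + |x|) 0

-- next((k for k, (r2, t2) in enumerate(rest) if k > 0 and abs(r2[i]) > rs and 2*abs(r2[i+k]) > t2), None)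
def pvFindB (i : Nat) (rs : Int) : Nat → List (List Int × Int) → Option Nat
  | _, [] => none
  | k, (r2, t2) :: tl =>
    if k > 0 ∧ rs < |r2.getD i 0| ∧ t2 < 2 * |r2.getD (i + k) 0| then some k
    else pvFindB i rs (k + 1) tl

-- the `for i in range(n)` loop over the shrinking suffix `rest` (cnt = iterations left)
def pvGoB (i : Nat) (rest : List (List Int × Int)) : Nat → Bool
  | 0 => true
  | cnt + 1 =>
    let p := rest.getD 0 ([], 0)
    let d := p.1.getD i 0
    if d = 0 then false
    else if 2 * |d| < p.2 then
      let rs := p.2 - |d|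
      match pvFindB i rs 0 rest with
      | none => false
      | some k =>
        let rest' := (rest.set 0 (rest.getD k ([], 0))).set k (rest.getD 0 ([], 0))
        pvGoB (i + 1) (rest'.drop 1) cnt
    else pvGoB (i + 1) (rest.drop 1) cnt

def check_matrix_for_seidel_method_alt (matrix : List (List Int)) : Bool :=
  pvGoB 0 (matrix.map (fun r => (r, pvTotB matrix.length r))) matrix.length

-- ===== PRECONDITION & SPEC =====
-- Pre_ excludes ragged matrices with a row shorter than len(matrix), on which the Python A raises
-- IndexError once a short row is indexed; matrices whose leading diagonal entry is 0 are kept (both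
-- return False immediately there), but a ragged matrix whose first zero diagonal appears later is
-- excluded although both still return False before reaching the short row — see the cite.
def Pre_check_matrix_for_seidel_method (matrix : List (List Int)) : Prop :=
  (∀ row ∈ matrix, matrix.length ≤ row.length) ∨ (matrix.getD 0 []).getD 0 1 = 0
instance (matrix : List (List Int)) : Decidable (Pre_check_matrix_for_seidel_method matrix) := by
  unfold Pre_check_matrix_for_seidel_method; infer_instance

def pvWitness_check_matrix_for_seidel_method : List (List Int) := [[2, 1], [1, 3]]

def Spec_check_matrix_for_seidel_method (matrix : List (List Int)) (out : Bool) : Prop := out = check_matrix_for_seidel_method_alt matrix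
instance (matrix : List (List Int)) (out : Bool) : Decidable (Spec_check_matrix_for_seidel_method matrix out) := by unfold Spec_check_matrix_for_seidel_method; infer_instance

-- ===== CLAIM (what is proved, stated in full; the proofs are below) =====
def Claim_equal_check_matrix_for_seidel_method : Prop := ∀ (matrix : List (List Int)), Dom_check_matrix_for_seidel_method matrix → Pre_check_matrix_for_seidel_method matrix → Spec_check_matrix_for_seidel_method matrix (check_matrix_for_seidel_method matrix)

-- ===== LEMMAS AND PROOFS =====

theorem pv_foldl_range_add (g : Nat → Int) (c : Int) (n : Nat) :
    (List.range n).foldl (fun s j => s + g j) c = c + ∑ j ∈ Finset.range n, g j := by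
  induction n with
  | zero => simp
  | succ k ih =>
    rw [List.range_succ, List.foldl_append, ih, Finset.sum_range_succ]
    simp [add_assoc]

theorem pv_foldl_range_skip (g : Nat → Int) (c : Int) (n i : Nat) :
    (List.range n).foldl (fun s j => if j ≠ i then s + g j else s) c
      = c + ∑ j ∈ Finset.range n, (if j = i then 0 else g j) := by
  rw [show (fun s j => if j ≠ i then s + g j else s)
        = (fun (s : Int) (j : Nat) => s + (if j = i then 0 else g j)) from
      funext fun s => funext fun j => by by_cases hj : j = i <;> simp [hj]]
  exact pv_foldl_range_add _ c n

theorem pv_foldl_abs (c : Int) (l : List Int) :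
    l.foldl (fun s x => s + |x|) c = c + (l.map (fun x => |x|)).sum := by
  induction l generalizing c with
  | nil => simp
  | cons a tl ih => simp [ih, add_assoc]

theorem pv_totB_eq (n : Nat) (row : List Int) :
    pvTotB n row = ∑ j ∈ Finset.range n, |row.getD j 0| := by
  unfold pvTotB
  rw [pv_foldl_abs]
  induction n with
  | zero => simp
  | succ k ih =>
    rw [List.take_add_one, Finset.sum_range_succ, ← ih]
    have : (row[k]?.toList.map (fun x => |x|)).sum = |row.getD k 0| := by
      cases h : row[k]? with
      | none => simp [List.getD, h]
      | some x => simp [List.getD, h]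
    simp [this]

theorem pv_rowSumA_eq (row : List Int) (i n : Nat) (hi : i < n) :
    pvRowSumA row i n = pvTotB n row - |row.getD i 0| := by
  unfold pvRowSumA
  rw [pv_foldl_range_skip, pv_totB_eq]
  have hsplit : ∑ j ∈ Finset.range n, |row.getD j 0|
      = (∑ j ∈ Finset.range n, (if j = i then |row.getD j 0| else 0))
        + ∑ j ∈ Finset.range n, (if j = i then 0 else |row.getD j 0|) := by
    rw [← Finset.sum_add_distrib]
    exact Finset.sum_congr rfl fun j _ => by by_cases hj : j = i <;> simp [hj]
  have hone : (∑ j ∈ Finset.range n, (if j = i then |row.getD j 0| else 0))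
      = |row.getD i 0| := by
    rw [Finset.sum_ite_eq' (Finset.range n) i (fun j => |row.getD j 0|)]
    simp [Finset.mem_range.mpr hi]
  rw [hsplit, hone]; ring

-- pvSearchA only returns elements of the list it scans
theorem pv_searchA_mem (m : List (List Int)) (n i : Nat) (rs : Int) :
    ∀ (hs : List Nat) (h : Nat), pvSearchA m n i rs hs = some h → h ∈ hs := by
  intro hs
  induction hs with
  | nil => intro h hh; simp [pvSearchA] at hh
  | cons a tl ih =>
    intro h hh
    unfold pvSearchA at hh
    by_cases hc : rs < |(m.getD a []).getD i 0| ∧ pvRowSumA (m.getD a []) a n < |(m.getD a []).getD a 0|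
    · simp only [if_pos hc] at hh
      rw [Option.some.inj hh]
      exact List.mem_cons_self
    · simp only [if_neg hc] at hh
      exact List.mem_cons_of_mem _ (ih h hh)

-- the search over the mapped suffix equals A's search, shifted by i
theorem pv_find_eq (m : List (List Int)) (n i : Nat) (rs : Int) (hm : m.length = n) :
    ∀ (c j : Nat), n - j ≤ c → i + 1 ≤ j →
    pvFindB i rs (j - i) ((m.drop j).map (fun r => (r, pvTotB n r)))
      = Option.map (fun h => h - i) (pvSearchA m n i rs (List.range' j (n - j))) := by
  intro c
  induction c with
  | zero =>
    intro j hc hij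
    have hjn : n ≤ j := by omega
    have hnj : n - j = 0 := by omega
    have hdrop : m.drop j = [] := by
      apply List.drop_eq_nil_of_le; omega
    rw [hnj, hdrop]
    simp [pvFindB, pvSearchA]
  | succ c' ih =>
    intro j hc hij
    by_cases hjn : j < n
    · have hjl : j < m.length := by omega
      have hdrop : m.drop j = m[j] :: m.drop (j + 1) := List.drop_eq_getElem_cons hjl
      have hnj : n - j = (n - (j + 1)) + 1 := by omega
      rw [hdrop, hnj, List.range'_succ]
      show pvFindB i rs (j - i) ((m[j], pvTotB n m[j]) :: (m.drop (j + 1)).map _) = _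
      rw [pvFindB, pvSearchA]
      have hget : m.getD j [] = m[j] := List.getD_eq_getElem m [] hjl
      have hidx : i + (j - i) = j := by omega
      have hcond : ((j - i > 0) ∧ rs < |m[j].getD i 0| ∧ pvTotB n m[j] < 2 * |m[j].getD (i + (j - i)) 0|)
          ↔ (rs < |(m.getD j []).getD i 0| ∧ pvRowSumA (m.getD j []) j n < |(m.getD j []).getD j 0|) := by
        rw [hget, hidx, pv_rowSumA_eq _ j n hjn]
        constructor
        · rintro ⟨_, h1, h2⟩; exact ⟨h1, by omega⟩
        · rintro ⟨h1, h2⟩; exact ⟨by omega, h1, by omega⟩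
      by_cases hA : rs < |(m.getD j []).getD i 0| ∧ pvRowSumA (m.getD j []) j n < |(m.getD j []).getD j 0|
      · rw [if_pos (hcond.mpr hA), if_pos hA]; rfl
      · rw [if_neg (fun hB => hA (hcond.mp hB)), if_neg hA]
        have : j - i + 1 = (j + 1) - i := by omega
        rw [this]
        exact ih (j + 1) (by omega) (by omega)
    · have hdrop : m.drop j = [] := by
        apply List.drop_eq_nil_of_le; omega
      have hnj : n - j = 0 := by omega
      rw [hnj, hdrop]
      simp [pvFindB, pvSearchA]

theorem pv_swap_drop (m : List (List Int)) (n i h : Nat) (hm : m.length = n)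
    (hih : i < h) (hh : h < n) :
    ((((m.drop i).map (fun r => (r, pvTotB n r))).set 0
        (m.getD h [], pvTotB n (m.getD h []))).set (h - i)
        (m.getD i [], pvTotB n (m.getD i []))).drop 1
      = ((pvSwapA m i h).drop (i + 1)).map (fun r => (r, pvTotB n r)) := by
  have hil : i < m.length := by omega
  have hhl : h < m.length := by omega
  apply List.ext_getElem
  · simp [pvSwapA]
    omega
  · intro p hp1 hp2
    have hplen : p < m.length - i - 1 := by
      simpa [pvSwapA] using hp2
    have hswlen : (pvSwapA m i h).length = m.length := by simp [pvSwapA]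
    rw [List.getElem_drop, List.getElem_map, List.getElem_drop]
    rw [List.getElem_set, List.getElem_set, List.getElem_map, List.getElem_drop]
    have hne0 : ¬ (0 = 1 + p) := by omega
    rw [if_neg hne0]
    unfold pvSwapA
    have hgi : m.getD i [] = m[i] := List.getD_eq_getElem m [] hil
    have hgh : m.getD h [] = m[h] := List.getD_eq_getElem m [] hhl
    rw [List.getElem_set, List.getElem_set]
    have hine : ¬ (i = i + 1 + p) := by omega
    rw [if_neg hine]
    by_cases hcase : h - i = 1 + p
    · have hh2 : h = i + 1 + p := by omega
      rw [if_pos hcase, if_pos hh2, hgi]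
    · have hh2 : ¬ (h = i + 1 + p) := by omega
      rw [if_neg hcase, if_neg hh2]
      have hidx : i + (1 + p) = i + 1 + p := by omega
      simp [hidx]

theorem pv_loop_eq (n : Nat) :
    ∀ (c : Nat) (m : List (List Int)) (i : Nat), m.length = n → c = n - i →
    pvLoopA n m i = pvGoB i ((m.drop i).map (fun r => (r, pvTotB n r))) c := by
  intro c
  induction c with
  | zero =>
    intro m i hm hc
    have hlt : ¬ i < n := by omega
    rw [pvLoopA, dif_neg hlt, pvGoB]
  | succ c' ih =>
    intro m i hm hc
    have hlt : i < n := by omega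
    rw [pvLoopA, dif_pos hlt, pvGoB]
    have hil : i < m.length := by omega
    have hR0 : ((m.drop i).map (fun r => (r, pvTotB n r))).getD 0 ([], 0)
        = (m[i], pvTotB n m[i]) := by
      rw [List.getD_eq_getElem _ _ (by simp; omega)]
      simp
    rw [hR0]
    have hgi : m.getD i [] = m[i] := List.getD_eq_getElem m [] hil
    rw [hgi]
    simp only []
    by_cases hd : m[i].getD i 0 = 0
    · rw [if_pos hd, if_pos hd]
    · rw [if_neg hd, if_neg hd]
      have hrs : pvRowSumA m[i] i n = pvTotB n m[i] - |m[i].getD i 0| :=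
        pv_rowSumA_eq _ i n hlt
      have hdom : (|m[i].getD i 0| < pvRowSumA m[i] i n)
          ↔ (2 * |m[i].getD i 0| < pvTotB n m[i]) := by
        rw [hrs]; omega
      by_cases hb : 2 * |m[i].getD i 0| < pvTotB n m[i]
      · rw [if_pos (hdom.mpr hb), if_pos hb]
        have hfind := pv_find_eq m n i (pvRowSumA m[i] i n) hm (n - (i + 1)) (i + 1)
          (by omega) (by omega)
        have hki : (i + 1) - i = 1 := by omega
        rw [hki] at hfind
        have hfold : pvFindB i (pvTotB n m[i] - |m[i].getD i 0|) 0
            ((m.drop i).map (fun r => (r, pvTotB n r)))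
            = pvFindB i (pvRowSumA m[i] i n) 1 ((m.drop (i + 1)).map (fun r => (r, pvTotB n r))) := by
          rw [List.drop_eq_getElem_cons hil]
          show pvFindB i _ 0 ((m[i], pvTotB n m[i]) :: _) = _
          rw [pvFindB]
          rw [if_neg (by rintro ⟨h0, _⟩; omega)]
          rw [hrs]
        rw [hfold, hfind]
        cases hsearch : pvSearchA m n i (pvRowSumA m[i] i n) (List.range' (i + 1) (n - (i + 1))) with
        | none => rfl
        | some h =>
          have hmem := pv_searchA_mem m n i _ _ h hsearch
          have hhr := List.mem_range'_1.mp hmem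
          have hih : i < h := by omega
          have hhn : h < n := by omega
          have hhl : h < m.length := by omega
          have hRk : ((m.drop i).map (fun r => (r, pvTotB n r))).getD (h - i) ([], 0)
              = (m.getD h [], pvTotB n (m.getD h [])) := by
            rw [List.getD_eq_getElem _ _ (by simp; omega)]
            have hidx : i + (h - i) = h := by omega
            simp [hidx, List.getD, List.getElem?_eq_getElem hhl]
          show pvLoopA n (pvSwapA m i h) (i + 1)
              = pvGoB (i + 1)
                (((((m.drop i).map (fun r => (r, pvTotB n r))).set 0
                    (((m.drop i).map (fun r => (r, pvTotB n r))).getD (h - i) ([], 0))).set (h - i)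
                    (m[i], pvTotB n m[i])).drop 1) c'
          rw [hRk, show ((m[i] : List Int), pvTotB n m[i]) = (m.getD i [], pvTotB n (m.getD i [])) by rw [hgi]]
          rw [pv_swap_drop m n i h hm hih hhn]
          exact ih (pvSwapA m i h) (i + 1) (by simp [pvSwapA]; omega) (by omega)
      · rw [if_neg (fun hA => hb (hdom.mp hA)), if_neg hb]
        rw [List.map_drop, List.drop_drop, ← List.map_drop]
        exact ih m (i + 1) hm (by omega)

-- ===== VERDICT (by name: the statement is the Claim_ definition above) =====
theorem check_matrix_for_seidel_method_spec : Claim_equal_check_matrix_for_seidel_method := by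
  intro matrix _dom _pre
  unfold Spec_check_matrix_for_seidel_method check_matrix_for_seidel_method check_matrix_for_seidel_method_alt
  simpa using pv_loop_eq matrix.length matrix.length matrix 0 rfl (by omega)
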